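-- pv_equiv track=rewrite | github.com/need-singularity/anima | experiments/acceleration_j4_multi_resolution.py | tier_assignment
-- ===== SOURCE A (Python) =====
-- def tier_assignment(n_cells, tiers):
--     """Assign each cell index to a tier.
--
--     Returns:
--         cell_tier: list[str] — tier name for each cell index
--         tier_indices: dict[str, list[int]] — cell indices per tier
--     """
--     cell_tier = []
--     tier_indices = {name: [] for name in tiers}
--     idx = 0
--     for name, cfg in tiers.items():
--         for _ in range(cfg['count']):
--             if idx >= n_cells:
--                 break
--             cell_tier.append(name)
--             tier_indices[name].append(idx)
--             idx += 1
--     # Fill remaining cells into fast tier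
--     while idx < n_cells:
--         cell_tier.append('fast')
--         tier_indices['fast'].append(idx)
--         idx += 1
--     return cell_tier, tier_indices
-- ===== SOURCE B (Python) =====
-- def tier_assignment(n_cells, tiers):
--     """Assign each cell index to a tier (labels-first, then group)."""
--     tier_indices = {name: [] for name in tiers}
--     cell_tier = []
--     for name, cfg in tiers.items():
--         take = min(cfg['count'], n_cells - len(cell_tier))
--         cell_tier += [name] * take
--     cell_tier += ['fast'] * (n_cells - len(cell_tier))
--     for i, name in enumerate(cell_tier):
--         tier_indices[name].append(i)
--     return cell_tier, tier_indices
-- ===== Notes on version B (the rewrite author's own statement) =====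
-- stated objective: alternative
-- what changed: A interleaves index tracking with tier iteration in one loop; B first builds the flat label list per tier via min(count, remaining) replication plus 'fast' padding, then groups indices in a separate enumerate pass.
import Mathlib
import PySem

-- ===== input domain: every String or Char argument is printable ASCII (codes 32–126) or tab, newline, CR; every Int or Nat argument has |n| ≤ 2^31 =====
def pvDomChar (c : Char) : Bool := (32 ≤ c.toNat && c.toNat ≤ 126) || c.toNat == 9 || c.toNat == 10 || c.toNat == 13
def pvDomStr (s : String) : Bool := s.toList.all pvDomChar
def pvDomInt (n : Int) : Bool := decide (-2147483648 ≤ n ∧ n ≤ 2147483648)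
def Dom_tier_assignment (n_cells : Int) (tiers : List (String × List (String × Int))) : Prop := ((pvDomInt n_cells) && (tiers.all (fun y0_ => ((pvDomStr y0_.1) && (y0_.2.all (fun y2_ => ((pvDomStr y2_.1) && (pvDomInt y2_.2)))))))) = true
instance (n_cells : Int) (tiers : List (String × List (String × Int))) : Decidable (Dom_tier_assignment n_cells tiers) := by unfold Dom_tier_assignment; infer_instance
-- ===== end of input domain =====

-- B builds the flat label list first (replication + padding) and groups indices in a second
-- enumerate pass, instead of A's single interleaved idx-tracking loop; equivalence of RETURN values.

-- ===== PORT A =====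
-- inner 'for _ in range(cfg["count"]): if idx >= n_cells: break; …' — fuel = count, the break
-- returns the state unchanged.  tier_indices[name].append raises KeyError in Python when name is
-- absent; the port's Dict.modify inserts instead — Pre_ excludes exactly those inputs ('fast' missing).
def pvInnerA (n_cells : Int) (name : String) :
    Nat → (List String × PySem.Dict String (List Int) × Int) → (List String × PySem.Dict String (List Int) × Int)
  | 0, st => st
  | k + 1, (ct, ti, idx) =>
    if n_cells ≤ idx then (ct, ti, idx)
    else pvInnerA n_cells name k (ct ++ [name], ti.modify name [] (· ++ [idx]), idx + 1)

-- 'while idx < n_cells: …' — fuel (n_cells - idx).toNat is exactly the number of iterations.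
def pvFillA (n_cells : Int) :
    Nat → (List String × PySem.Dict String (List Int) × Int) → (List String × PySem.Dict String (List Int) × Int)
  | 0, st => st
  | k + 1, (ct, ti, idx) => pvFillA n_cells k (ct ++ ["fast"], ti.modify "fast" [] (· ++ [idx]), idx + 1)

def tier_assignment (n_cells : Int) (tiers : List (String × List (String × Int))) :
    List String × (List (String × List Int)) :=
  let d := PySem.Dict.ofList (tiers.map (fun p => (p.1, PySem.Dict.ofList p.2)))
  let ti0 : PySem.Dict String (List Int) := d.keys.foldl (fun acc k => acc.insert k []) PySem.Dict.empty
  -- cfg['count'] raises KeyError when absent; the port takes default 0 and Pre_ excludes those inputs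
  let st := d.items.foldl (fun st p => pvInnerA n_cells p.1 (p.2.getD "count" 0).toNat st) ([], ti0, 0)
  let fin := pvFillA n_cells (n_cells - st.2.2).toNat st
  (fin.1, fin.2.1.items)

-- ===== PORT B =====
def tier_assignment_alt (n_cells : Int) (tiers : List (String × List (String × Int))) :
    List String × (List (String × List Int)) :=
  let d := PySem.Dict.ofList (tiers.map (fun p => (p.1, PySem.Dict.ofList p.2)))
  let ti0 : PySem.Dict String (List Int) := d.keys.foldl (fun acc k => acc.insert k []) PySem.Dict.empty
  -- labels first: [name] * min(cfg['count'], n_cells - len(cell_tier)), then pad with 'fast'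
  let ct1 := d.items.foldl
    (fun acc p => acc ++ List.replicate (min (p.2.getD "count" 0) (n_cells - acc.length)).toNat p.1) []
  let ct := ct1 ++ List.replicate (n_cells - ct1.length).toNat "fast"
  -- grouping pass: for i, name in enumerate(cell_tier): tier_indices[name].append(i)
  let ti := (PySem.List.enumerate ct 0).foldl (fun ti q => ti.modify q.2 [] (· ++ [q.1])) ti0
  (ct, ti.items)

-- ===== PRECONDITION & SPEC =====
-- Pre_ admits exactly the inputs where Python A returns: every tier's cfg has a 'count' key
-- (else cfg['count'] raises KeyError), and either 'fast' is a tier or the capped counts already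
-- cover n_cells (else the fill loop raises KeyError on tier_indices['fast']).
def Pre_tier_assignment (n_cells : Int) (tiers : List (String × List (String × Int))) : Prop :=
  let d := PySem.Dict.ofList (tiers.map (fun p => (p.1, PySem.Dict.ofList p.2)))
  (∀ p ∈ d.items, p.2.contains "count" = true) ∧
  (d.contains "fast" = true ∨ n_cells ≤ (d.items.map (fun p => max (p.2.getD "count" 0) 0)).sum)
instance (n_cells : Int) (tiers : List (String × List (String × Int))) : Decidable (Pre_tier_assignment n_cells tiers) := by unfold Pre_tier_assignment; infer_instance

def pvWitness_tier_assignment : Int × (List (String × List (String × Int))) :=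
  (3, [("slow", [("count", 2)]), ("fast", [("count", 0)])])

def Spec_tier_assignment (n_cells : Int) (tiers : List (String × List (String × Int))) (out : List String × (List (String × List Int))) : Prop := out = tier_assignment_alt n_cells tiers
instance (n_cells : Int) (tiers : List (String × List (String × Int))) (out : List String × (List (String × List Int))) : Decidable (Spec_tier_assignment n_cells tiers out) := by unfold Spec_tier_assignment; infer_instance

-- ===== CLAIM (what is proved, stated in full; the proofs are below) =====
def Claim_equal_tier_assignment : Prop := ∀ (n_cells : Int) (tiers : List (String × List (String × Int))), Dom_tier_assignment n_cells tiers → Pre_tier_assignment n_cells tiers → Spec_tier_assignment n_cells tiers (tier_assignment n_cells tiers)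

-- ===== LEMMAS AND PROOFS =====

-- 'group i into ti at each label of ls, indices counting up from i'
def pvAddGroup : List String → Int → PySem.Dict String (List Int) → PySem.Dict String (List Int)
  | [], _, ti => ti
  | s :: rest, i, ti => pvAddGroup rest (i + 1) (ti.modify s [] (· ++ [i]))

-- the labels contributed by the tier loop, starting at flat length L
def pvTails (n_cells : Int) : List (String × PySem.Dict String Int) → Int → List String
  | [], _ => []
  | p :: rest, L =>
    let rep := List.replicate (min (p.2.getD "count" 0) (n_cells - L)).toNat p.1
    rep ++ pvTails n_cells rest (L + rep.length)

theorem pvAddGroup_append (xs ys : List String) (i : Int) (ti : PySem.Dict String (List Int)) :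
    pvAddGroup (xs ++ ys) i ti = pvAddGroup ys (i + xs.length) (pvAddGroup xs i ti) := by
  induction xs generalizing i ti with
  | nil => simp [pvAddGroup]
  | cons x xs ih => simp [pvAddGroup, ih]; ring_nf

theorem pvInnerA_spec (n_cells : Int) (name : String) (k : Nat) :
    ∀ (ct : List String) (ti : PySem.Dict String (List Int)),
    pvInnerA n_cells name k (ct, ti, (ct.length : Int)) =
      (ct ++ List.replicate (min (k : Int) (n_cells - ct.length)).toNat name,
       pvAddGroup (List.replicate (min (k : Int) (n_cells - ct.length)).toNat name) (ct.length : Int) ti,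
       (ct.length : Int) + (min (k : Int) (n_cells - ct.length)).toNat) := by
  induction k with
  | zero =>
    intro ct ti
    have hz : (min ((0 : Nat) : Int) (n_cells - ct.length)).toNat = 0 := by omega
    rw [pvInnerA, hz]
    simp [pvAddGroup]
  | succ k ih =>
    intro ct ti
    by_cases h : n_cells ≤ (ct.length : Int)
    · have hz : (min ((k + 1 : Nat) : Int) (n_cells - ct.length)).toNat = 0 := by omega
      rw [pvInnerA, hz]
      simp [h, pvAddGroup]
    · have hm : (min ((k + 1 : Nat) : Int) (n_cells - ct.length)).toNat =
          (min ((k : Nat) : Int) (n_cells - ((ct.length : Int) + 1))).toNat + 1 := by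
        push_cast; omega
      have hrec := ih (ct ++ [name]) (ti.modify name [] (· ++ [(ct.length : Int)]))
      simp only [List.length_append, List.length_cons, List.length_nil, Nat.cast_add,
        Nat.cast_one, zero_add] at hrec
      rw [pvInnerA, if_neg h, hrec, hm, List.replicate_succ]
      simp only [pvAddGroup, Prod.mk.injEq]
      refine ⟨by simp, by trivial, by push_cast; ring⟩

theorem pvFillA_spec (n_cells : Int) (k : Nat) :
    ∀ (ct : List String) (ti : PySem.Dict String (List Int)),
    pvFillA n_cells k (ct, ti, (ct.length : Int)) =
      (ct ++ List.replicate k "fast",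
       pvAddGroup (List.replicate k "fast") (ct.length : Int) ti,
       (ct.length : Int) + k) := by
  induction k with
  | zero => intro ct ti; simp [pvFillA, pvAddGroup]
  | succ k ih =>
    intro ct ti
    have hrec := ih (ct ++ ["fast"]) (ti.modify "fast" [] (· ++ [(ct.length : Int)]))
    simp only [List.length_append, List.length_cons, List.length_nil, Nat.cast_add,
      Nat.cast_one, zero_add] at hrec
    rw [pvFillA, hrec, List.replicate_succ]
    simp only [pvAddGroup, Prod.mk.injEq]
    refine ⟨by simp, by trivial, by push_cast; ring⟩

-- the A-side tier loop, expressed through pvTails and pvAddGroup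
theorem pvOuterA_spec (n_cells : Int) (items : List (String × PySem.Dict String Int)) :
    ∀ (ct : List String) (ti : PySem.Dict String (List Int)),
    items.foldl (fun st p => pvInnerA n_cells p.1 (p.2.getD "count" 0).toNat st) (ct, ti, (ct.length : Int)) =
      (ct ++ pvTails n_cells items (ct.length : Int),
       pvAddGroup (pvTails n_cells items (ct.length : Int)) (ct.length : Int) ti,
       (ct.length : Int) + (pvTails n_cells items (ct.length : Int)).length) := by
  induction items with
  | nil => intro ct ti; simp [pvTails, pvAddGroup]
  | cons p rest ih =>
    intro ct ti
    simp only [List.foldl_cons]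
    have hcast : (min (((p.2.getD "count" 0).toNat : Nat) : Int) (n_cells - ct.length)).toNat =
        (min (p.2.getD "count" 0) (n_cells - ct.length)).toNat := by omega
    rw [pvInnerA_spec, hcast]
    set rep := List.replicate (min (p.2.getD "count" 0) (n_cells - ct.length)).toNat p.1 with hrep
    have harg : ((ct.length : Int) + (min (p.2.getD "count" 0) (n_cells - ct.length)).toNat) =
        (((ct ++ rep).length : Nat) : Int) := by
      simp only [hrep, List.length_append, List.length_replicate]; push_cast; ring
    rw [harg, ih (ct ++ rep)]
    have hlen : (((ct ++ rep).length : Nat) : Int) = (ct.length : Int) + (rep.length : Int) := by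
      simp only [List.length_append]; push_cast; ring
    rw [hlen]
    simp only [pvTails, ← hrep, Prod.mk.injEq]
    refine ⟨by simp, by rw [pvAddGroup_append], ?_⟩
    simp only [List.length_append]
    push_cast; ring

-- the B-side label fold equals ct ++ pvTails
theorem pvCtB_spec (n_cells : Int) (items : List (String × PySem.Dict String Int)) :
    ∀ (ct : List String),
    items.foldl (fun acc p => acc ++ List.replicate (min (p.2.getD "count" 0) (n_cells - acc.length)).toNat p.1) ct =
      ct ++ pvTails n_cells items (ct.length : Int) := by
  induction items with
  | nil => intro ct; simp [pvTails]
  | cons p rest ih =>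
    intro ct
    simp only [List.foldl_cons, pvTails]
    rw [ih]
    have hlen : (((ct ++ List.replicate (min (p.2.getD "count" 0) (n_cells - ct.length)).toNat p.1).length : Nat) : Int) =
        (ct.length : Int) + ((List.replicate (min (p.2.getD "count" 0) (n_cells - ct.length)).toNat p.1).length : Int) := by
      simp only [List.length_append]; push_cast; ring
    rw [hlen]
    simp

-- the B-side grouping fold is pvAddGroup
theorem pvGroupB_spec (ls : List String) :
    ∀ (i : Int) (ti : PySem.Dict String (List Int)),
    (PySem.List.enumerate ls i).foldl (fun ti q => ti.modify q.2 [] (· ++ [q.1])) ti = pvAddGroup ls i ti := by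
  induction ls with
  | nil => intro i ti; simp [PySem.List.enumerate_nil, pvAddGroup]
  | cons s rest ih =>
    intro i ti
    rw [PySem.List.enumerate_cons]
    simp only [List.foldl_cons]
    exact ih (i + 1) _

-- ===== VERDICT (by name: the statement is the Claim_ definition above) =====
theorem tier_assignment_spec : Claim_equal_tier_assignment := by
  intro n_cells tiers _ _
  simp only [Spec_tier_assignment, tier_assignment, tier_assignment_alt]
  set d := PySem.Dict.ofList (tiers.map (fun p => (p.1, PySem.Dict.ofList p.2))) with hd
  set ti0 : PySem.Dict String (List Int) := d.keys.foldl (fun acc k => acc.insert k []) PySem.Dict.empty with hti0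
  have houter := pvOuterA_spec n_cells d.items ([] : List String) ti0
  simp only [List.length_nil, Nat.cast_zero, List.nil_append, zero_add] at houter
  rw [houter]
  have hct1 := pvCtB_spec n_cells d.items ([] : List String)
  simp only [List.length_nil, Nat.cast_zero, List.nil_append] at hct1
  rw [hct1]
  set T := pvTails n_cells d.items 0 with hT
  have hfill := pvFillA_spec n_cells (n_cells - (T.length : Int)).toNat T (pvAddGroup T 0 ti0)
  simp only [hfill, pvGroupB_spec, pvAddGroup_append, zero_add]
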